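-- pv_equiv track=rewrite | github.com/eoinmtreacy/aoc-2024 | day12/part_two.py | fences_to_sides
-- ===== SOURCE A (Python) =====
-- from typing import List
--
-- def fences_to_sides(fences: List[List[List[bool]]]):
--     result = 0
--     for row in fences[0]:
--         i = 0
--         while i < len(row):
--             if row[i]:
--                 result += 1
--                 while i < len(row) and row[i]:
--                     i += 1
--                 i -= 1
--             i += 1
--     top = result
--
--     for row in fences[1]:
--         i = 0
--         while i < len(row):
--             if row[i]:
--                 result += 1
--                 while i < len(row) and row[i]:
--                     i += 1
--                 i -= 1
--             i += 1
--
--     for col in range(len(fences[2][0])):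
--         row = 0
--         while row < len(fences[2]):
--             if fences[2][row][col]:
--                 result += 1
--                 while row < len(fences[2]) and fences[2][row][col]:
--                     row += 1
--                 row -= 1
--             row += 1
--
--     for col in range(len(fences[3][0])):
--         row = 0
--         while row < len(fences[3]):
--             if fences[3][row][col]:
--                 result += 1
--                 while row < len(fences[3]) and fences[3][row][col]:
--                     row += 1
--                 row -= 1
--             row += 1
--     return result
-- ===== SOURCE B (Python) =====
-- from typing import List
--
-- def fences_to_sides(fences: List[List[List[bool]]]):
--     # runs = (# True cells) - (# adjacent True-True pairs): count both globally,
--     # no run-scanning state; column grids handled row-major via consecutive row pairs.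
--     total = 0
--     for g in (fences[0], fences[1]):
--         for row in g:
--             total += sum(row) - sum(a and b for a, b in zip(row, row[1:]))
--     for g in (fences[2], fences[3]):
--         w = len(g[0])
--         total += sum(sum(row[:w]) for row in g)
--         total -= sum(sum(a and b for a, b in zip(r1[:w], r2[:w]))
--                      for r1, r2 in zip(g, g[1:]))
--     return total
-- ===== Notes on version B (the rewrite author's own statement) =====
-- stated objective: alternative
-- what changed: A detects each run sequentially with nested index-skipping while-loops (walking columns for grids 2-3); B uses inclusion-exclusion -- runs = (# True cells) - (# adjacent True-True pairs) -- counting cells and adjacencies globally with no sequential run state, and handles the column grids row-major by zipping consecutive rows instead of walking columns.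
import Mathlib
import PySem

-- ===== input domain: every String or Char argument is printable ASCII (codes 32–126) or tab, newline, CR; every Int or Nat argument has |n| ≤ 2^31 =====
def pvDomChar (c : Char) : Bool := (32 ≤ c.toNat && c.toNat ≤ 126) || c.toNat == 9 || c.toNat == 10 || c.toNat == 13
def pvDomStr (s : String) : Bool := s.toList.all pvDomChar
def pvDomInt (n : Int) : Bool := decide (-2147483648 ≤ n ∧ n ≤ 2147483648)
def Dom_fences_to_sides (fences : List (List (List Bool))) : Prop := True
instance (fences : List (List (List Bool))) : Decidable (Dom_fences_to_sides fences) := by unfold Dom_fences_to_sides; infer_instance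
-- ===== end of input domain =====

-- B replaces A's sequential run-scanning by inclusion–exclusion (runs = True cells minus
-- adjacent True–True pairs), counting the column grids row-major over consecutive row pairs
-- instead of walking columns (objective: alternative).

-- ===== PORT A =====
-- the cell access fences[g][row][col] (in range on every admitted input; out of range Python raises, excluded by Pre_)
def cellC (grid : List (List Bool)) (col r : Nat) : Bool := (grid.getD r []).getD col false

-- inner `while i < len(row) and row[i]: i += 1` (row[i] in range here, ported as getD;
-- fuel only makes the loop total: with fuel > len(row) - i it never runs out)
def skipA (row : List Bool) : Nat → Nat → Nat
  | 0, i => i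
  | f + 1, i => if i < row.length ∧ row.getD i false = true then skipA row f (i + 1) else i

-- outer `while i < len(row): if row[i]: result += 1; <inner while>; i -= 1; i += 1`
def whileA (row : List Bool) : Nat → Nat → Int → Int
  | 0, _, acc => acc
  | f + 1, i, acc =>
    if i < row.length then
      if row.getD i false = true then
        whileA row f (skipA row (f + 1) i - 1 + 1) (acc + 1)
      else
        whileA row f (i + 1) acc
    else acc

-- the same two while loops walking a column of a grid
def skipC (grid : List (List Bool)) (col : Nat) : Nat → Nat → Nat
  | 0, r => r
  | f + 1, r => if r < grid.length ∧ cellC grid col r = true then skipC grid col f (r + 1) else r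

def whileC (grid : List (List Bool)) (col : Nat) : Nat → Nat → Int → Int
  | 0, _, acc => acc
  | f + 1, r, acc =>
    if r < grid.length then
      if cellC grid col r = true then
        whileC grid col f (skipC grid col (f + 1) r - 1 + 1) (acc + 1)
      else
        whileC grid col f (r + 1) acc
    else acc

def fences_to_sides (fences : List (List (List Bool))) : Int :=
  let result : Int := (fences.getD 0 []).foldl (fun acc row => whileA row (row.length + 1) 0 acc) 0
  -- `top = result` in the Python is dead code
  let result := (fences.getD 1 []).foldl (fun acc row => whileA row (row.length + 1) 0 acc) result
  let result := (List.range ((fences.getD 2 []).getD 0 []).length).foldl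
      (fun acc col => whileC (fences.getD 2 []) col ((fences.getD 2 []).length + 1) 0 acc) result
  let result := (List.range ((fences.getD 3 []).getD 0 []).length).foldl
      (fun acc col => whileC (fences.getD 3 []) col ((fences.getD 3 []).length + 1) 0 acc) result
  result

-- ===== PORT B =====
-- sum(row): the number of True cells
def cntB (l : List Bool) : Int := (l.map (fun b => if b then (1 : Int) else 0)).sum

-- sum(a and b for a, b in zip(l1, l2)): aligned True–True pairs
def adjB (l1 l2 : List Bool) : Int :=
  ((l1.zip l2).map (fun q => if q.1 && q.2 then (1 : Int) else 0)).sum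

-- one row-grid row: sum(row) - sum(a and b for a, b in zip(row, row[1:]))
def rowScore (row : List Bool) : Int := cntB row - adjB row row.tail

-- one column grid: True cells in the first w columns minus vertical True–True adjacencies there
def colGridScore (g : List (List Bool)) : Int :=
  let w := (g.getD 0 []).length
  (g.map (fun r => cntB (r.take w))).sum
    - ((g.zip g.tail).map (fun p => adjB (p.1.take w) (p.2.take w))).sum

def fences_to_sides_alt (fences : List (List (List Bool))) : Int :=
  ((fences.getD 0 []).map rowScore).sum + ((fences.getD 1 []).map rowScore).sum
    + colGridScore (fences.getD 2 []) + colGridScore (fences.getD 3 [])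

-- ===== PRECONDITION & SPEC =====
-- Exactly the inputs where A returns: at least 4 grids (fences[3] is indexed), grids 2 and 3
-- nonempty (fences[g][0] is indexed) and each of their rows at least as long as their first row
-- (every row is indexed at every column in range(len(fences[g][0]))); elsewhere A raises IndexError.
def Pre_fences_to_sides (fences : List (List (List Bool))) : Prop :=
  4 ≤ fences.length ∧
  fences.getD 2 [] ≠ [] ∧ fences.getD 3 [] ≠ [] ∧
  (∀ row ∈ fences.getD 2 [], ((fences.getD 2 []).getD 0 []).length ≤ row.length) ∧
  (∀ row ∈ fences.getD 3 [], ((fences.getD 3 []).getD 0 []).length ≤ row.length)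
instance (fences : List (List (List Bool))) : Decidable (Pre_fences_to_sides fences) := by
  unfold Pre_fences_to_sides; infer_instance

def pvWitness_fences_to_sides : List (List (List Bool)) :=
  [[[true, false, true]], [[false]], [[true], [false]], [[true, true]]]

def Spec_fences_to_sides (fences : List (List (List Bool))) (out : Int) : Prop := out = fences_to_sides_alt fences
instance (fences : List (List (List Bool))) (out : Int) : Decidable (Spec_fences_to_sides fences out) := by unfold Spec_fences_to_sides; infer_instance

-- ===== CLAIM (what is proved, stated in full; the proofs are below) =====
def Claim_equal_fences_to_sides : Prop := ∀ (fences : List (List (List Bool))), Dom_fences_to_sides fences → Pre_fences_to_sides fences → Spec_fences_to_sides fences (fences_to_sides fences)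

-- ===== LEMMAS AND PROOFS =====

-- run counter with an explicit previous-cell state: the common spec of both programs
def countRunsL : Bool → List Bool → Int
  | _, [] => 0
  | prev, v :: t => (if v && !prev then 1 else 0) + countRunsL v t

-- the column a whileC walk reads
def colL (grid : List (List Bool)) (col : Nat) : List Bool :=
  grid.map (fun s => s.getD col false)

theorem sum_map_add {α : Type} (l : List α) (f g : α → Int) :
    (l.map (fun x => f x + g x)).sum = (l.map f).sum + (l.map g).sum := by
  induction l with
  | nil => simp
  | cons x t ih => simp [ih]; ring

theorem sum_map_sub {α : Type} (l : List α) (f g : α → Int) :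
    (l.map (fun x => f x - g x)).sum = (l.map f).sum - (l.map g).sum := by
  induction l with
  | nil => simp
  | cons x t ih => simp [ih]; ring

-- inclusion–exclusion: runs = True cells minus True–True adjacencies
theorem runs_ie (l : List Bool) : ∀ prev, countRunsL prev l = cntB l - adjB (prev :: l) l := by
  induction l with
  | nil => intro prev; simp [countRunsL, cntB, adjB]
  | cons v t ih =>
      intro prev
      simp only [countRunsL, ih v, cntB, adjB, List.zip_cons_cons, List.map_cons, List.sum_cons]
      cases v <;> cases prev <;> simp <;> ring

theorem runs_false (l : List Bool) : countRunsL false l = cntB l - adjB l l.tail := by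
  cases l with
  | nil => simp [countRunsL, cntB, adjB]
  | cons v t =>
      rw [runs_ie (v :: t) false]
      simp [adjB, List.zip_cons_cons]

theorem getD_cons_drop (row : List Bool) (i : Nat) (h : i < row.length) :
    row.drop i = row.getD i false :: row.drop (i + 1) := by
  rw [List.drop_eq_getElem_cons h, List.getD_eq_getElem row false h]

theorem countRunsL_true_dropWhile (l : List Bool) :
    countRunsL true l = countRunsL false (l.dropWhile (fun b => b)) := by
  induction l with
  | nil => rfl
  | cons v t ih =>
      cases v with
      | false => simp [countRunsL, List.dropWhile]
      | true => simpa [countRunsL, List.dropWhile] using ih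

-- dropping the takeWhile prefix is dropWhile
theorem drop_len_takeWhile (p : Bool → Bool) (l : List Bool) :
    l.drop (l.takeWhile p).length = l.dropWhile p := by
  induction l with
  | nil => rfl
  | cons v t ih =>
      by_cases hv : p v
      · simpa [List.takeWhile_cons, List.dropWhile_cons, hv] using ih
      · simp [List.takeWhile_cons, List.dropWhile_cons, hv]

-- with enough fuel, skipA lands right after the run starting at i
theorem skipA_fuel (row : List Bool) (f : Nat) : ∀ i, row.length - i < f →
    skipA row f i = i + ((row.drop i).takeWhile (fun b => b)).length := by
  induction f with
  | zero => intro i h; exact absurd h (by omega)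
  | succ g ih =>
      intro i h
      simp only [skipA]
      by_cases hc : i < row.length ∧ row.getD i false = true
      · rw [if_pos hc, ih (i + 1) (by omega), getD_cons_drop row i hc.1, hc.2]
        simp [List.takeWhile_cons]
        omega
      · rw [if_neg hc]
        by_cases hi : i < row.length
        · have hv : row.getD i false = false := by
            cases hb : row.getD i false
            · rfl
            · exact absurd ⟨hi, hb⟩ hc
          rw [getD_cons_drop row i hi, hv]
          simp [List.takeWhile_cons]
        · rw [List.drop_eq_nil_of_le (by omega)]
          simp

-- with enough fuel, whileA counts the runs from position i
theorem whileA_fuel (row : List Bool) (f : Nat) : ∀ i acc, row.length - i < f →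
    whileA row f i acc = acc + countRunsL false (row.drop i) := by
  induction f with
  | zero => intro i acc h; exact absurd h (by omega)
  | succ g ih =>
      intro i acc h
      simp only [whileA]
      by_cases hi : i < row.length
      · rw [if_pos hi]
        by_cases hv : row.getD i false = true
        · rw [if_pos hv, skipA_fuel row (g + 1) i (by omega)]
          have hd := getD_cons_drop row i hi
          have htw1 : 1 ≤ ((row.drop i).takeWhile (fun b => b)).length := by
            rw [hd, hv]
            simp [List.takeWhile_cons]
          set tw := ((row.drop i).takeWhile (fun b => b)).length with htwdef
          have htwle : tw ≤ (row.drop i).length := by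
            rw [htwdef]
            induction (row.drop i) with
            | nil => simp
            | cons x xs ihx =>
                by_cases hx : x = true
                · simp [List.takeWhile_cons, hx]; omega
                · simp [List.takeWhile_cons, hx]
          rw [show i + tw - 1 + 1 = i + tw from by omega,
            ih (i + tw) (acc + 1) (by simp [List.length_drop] at htwle; omega)]
          have hdrop : row.drop (i + tw) = (row.drop i).dropWhile (fun b => b) := by
            have : row.drop (i + tw) = (row.drop i).drop tw := by
              rw [List.drop_drop]
            rw [this, htwdef, drop_len_takeWhile]
          rw [hdrop, hd, hv, List.dropWhile_cons]
          simp only [countRunsL, countRunsL_true_dropWhile]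
          simp
          ring
        · rw [if_neg hv, ih (i + 1) acc (by omega), getD_cons_drop row i hi]
          have hvf : row.getD i false = false := by
            cases hb : row.getD i false
            · rfl
            · exact absurd hb hv
          rw [hvf]
          simp [countRunsL]
      · rw [if_neg hi, List.drop_eq_nil_of_le (by omega)]
        simp [countRunsL]

theorem colL_length (grid : List (List Bool)) (col : Nat) :
    (colL grid col).length = grid.length := by simp [colL]

theorem colL_getD (grid : List (List Bool)) (col r : Nat) :
    (colL grid col).getD r false = cellC grid col r := by
  unfold colL cellC
  simp only [List.getD, List.getElem?_map]
  cases grid[r]? <;> simp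

-- the column walks are the row walk on the materialised column
theorem skipC_eq (grid : List (List Bool)) (col : Nat) (f : Nat) : ∀ r,
    skipC grid col f r = skipA (colL grid col) f r := by
  induction f with
  | zero => intro r; rfl
  | succ g ih =>
      intro r
      simp only [skipC, skipA, colL_length, colL_getD]
      split
      · exact ih (r + 1)
      · rfl

theorem whileC_eq (grid : List (List Bool)) (col : Nat) (f : Nat) : ∀ r acc,
    whileC grid col f r acc = whileA (colL grid col) f r acc := by
  induction f with
  | zero => intro r acc; rfl
  | succ g ih =>
      intro r acc
      simp only [whileC, whileA, colL_length, colL_getD, skipC_eq]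
      by_cases hr : r < grid.length
      · rw [if_pos hr, if_pos hr]
        by_cases hv : cellC grid col r = true
        · rw [if_pos hv, if_pos hv, ih]
        · rw [if_neg hv, if_neg hv, ih]
      · rw [if_neg hr, if_neg hr]

theorem foldl_addlike {α : Type} (g : α → Int) (step : Int → α → Int)
    (hstep : ∀ a x, step a x = a + g x) :
    ∀ (l : List α) (init : Int), l.foldl step init = init + (l.map g).sum := by
  intro l
  induction l with
  | nil => intro init; simp
  | cons x t ih => intro init; simp only [List.foldl_cons, List.map_cons, List.sum_cons, hstep, ih]; ring

-- A's row loop sums runs per row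
theorem rows_sum (rows : List (List Bool)) (init : Int) :
    rows.foldl (fun acc row => whileA row (row.length + 1) 0 acc) init
      = init + (rows.map (fun row => countRunsL false row)).sum := by
  exact foldl_addlike _ _
    (fun a x => by rw [whileA_fuel x (x.length + 1) 0 a (by omega), List.drop_zero]) rows init

-- A's column loop sums runs per column
theorem cols_sum (grid : List (List Bool)) (w : Nat) (init : Int) :
    (List.range w).foldl (fun acc col => whileC grid col (grid.length + 1) 0 acc) init
      = init + ((List.range w).map (fun col => countRunsL false (colL grid col))).sum := by
  exact foldl_addlike _ _
    (fun a x => by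
      rw [whileC_eq grid x (grid.length + 1) 0 a,
        whileA_fuel (colL grid x) (grid.length + 1) 0 a (by rw [colL_length]; omega),
        List.drop_zero])
    (List.range w) init

-- sum-swap: True cells column-wise = True cells row-wise (first w columns)
theorem colsum_cnt (g : List (List Bool)) (w : Nat) :
    ((List.range w).map (fun col => cntB (colL g col))).sum
      = (g.map (fun r =>
          ((List.range w).map (fun j => if r.getD j false then (1 : Int) else 0)).sum)).sum := by
  induction g with
  | nil => simp [colL, cntB]
  | cons r rs ih =>
      have hcol : ∀ col, cntB (colL (r :: rs) col)
          = (if r.getD col false then (1 : Int) else 0) + cntB (colL rs col) := by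
        intro col; simp [colL, cntB]
      simp only [hcol, sum_map_add, ih, List.map_cons, List.sum_cons]

-- cells of row.take w = first w getD reads (w in range)
theorem take_cnt (r : List Bool) : ∀ w, w ≤ r.length →
    cntB (r.take w)
      = ((List.range w).map (fun j => if r.getD j false then (1 : Int) else 0)).sum := by
  induction r with
  | nil =>
      intro w hw
      have hw0 : w = 0 := Nat.le_zero.mp (by simpa using hw)
      subst hw0
      simp [cntB]
  | cons a t ih =>
      intro w hw
      cases w with
      | zero => simp [cntB]
      | succ k =>
          simp only [List.take_succ_cons]
          have : cntB (a :: t.take k) = (if a then (1 : Int) else 0) + cntB (t.take k) := by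
            simp [cntB]
          rw [this, ih k (by simpa using hw), List.range_succ_eq_map]
          simp only [List.map_cons, List.map_map, List.sum_cons, Function.comp_def,
            List.getD_cons_zero, List.getD_cons_succ]

-- sum-swap: vertical adjacencies column-wise = aligned pairs over consecutive rows
theorem colsum_adj (g : List (List Bool)) (w : Nat) :
    ((List.range w).map (fun col => adjB (colL g col) (colL g col).tail)).sum
      = ((g.zip g.tail).map (fun p =>
          ((List.range w).map (fun j =>
            if (p.1.getD j false) && (p.2.getD j false) then (1 : Int) else 0)).sum)).sum := by
  induction g with
  | nil => simp [colL, adjB]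
  | cons r1 rs ih =>
      cases rs with
      | nil => simp [colL, adjB]
      | cons r2 rest =>
          have hcol : ∀ col,
              adjB (colL (r1 :: r2 :: rest) col) (colL (r1 :: r2 :: rest) col).tail
                = (if (r1.getD col false) && (r2.getD col false) then (1 : Int) else 0)
                  + adjB (colL (r2 :: rest) col) (colL (r2 :: rest) col).tail := by
            intro col; simp [colL, adjB, List.zip_cons_cons]
          simp only [hcol, sum_map_add, ih, List.tail_cons, List.zip_cons_cons, List.map_cons,
            List.sum_cons]

-- aligned pairs of the two takes = first w paired getD reads (w in range of both)
theorem take_adj (r1 : List Bool) : ∀ (r2 : List Bool) (w : Nat),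
    w ≤ r1.length → w ≤ r2.length →
    adjB (r1.take w) (r2.take w)
      = ((List.range w).map (fun j =>
          if (r1.getD j false) && (r2.getD j false) then (1 : Int) else 0)).sum := by
  induction r1 with
  | nil =>
      intro r2 w hw _
      have hw0 : w = 0 := Nat.le_zero.mp (by simpa using hw)
      subst hw0
      simp [adjB]
  | cons a t1 ih =>
      intro r2 w hw1 hw2
      cases w with
      | zero => simp [adjB]
      | succ k =>
          cases r2 with
          | nil => simp at hw2
          | cons b t2 =>
              simp only [List.take_succ_cons]
              have : adjB (a :: t1.take k) (b :: t2.take k)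
                  = (if a && b then (1 : Int) else 0) + adjB (t1.take k) (t2.take k) := by
                simp [adjB, List.zip_cons_cons]
              rw [this, ih t2 k (by simpa using hw1) (by simpa using hw2),
                List.range_succ_eq_map]
              simp only [List.map_cons, List.map_map, List.sum_cons, Function.comp_def,
                List.getD_cons_zero, List.getD_cons_succ]

-- one column grid: A's column run sum equals B's inclusion–exclusion score
theorem col_grid_eq (g : List (List Bool)) (w : Nat)
    (hrect : ∀ row ∈ g, w ≤ row.length) :
    ((List.range w).map (fun col => countRunsL false (colL g col))).sum
      = (g.map (fun r => cntB (r.take w))).sum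
        - ((g.zip g.tail).map (fun p => adjB (p.1.take w) (p.2.take w))).sum := by
  simp only [runs_false, sum_map_sub, colsum_cnt, colsum_adj]
  congr 1
  · exact congrArg List.sum (List.map_congr_left (fun r hr =>
      (take_cnt r w (hrect r hr)).symm))
  · refine congrArg List.sum (List.map_congr_left (fun p hp => ?_))
    have h1 : p.1 ∈ g := (List.of_mem_zip hp).1
    have h2 : p.2 ∈ g := List.mem_of_mem_tail (List.of_mem_zip hp).2
    exact (take_adj p.1 p.2 w (hrect _ h1) (hrect _ h2)).symm

-- ===== VERDICT (by name: the statement is the Claim_ definition above) =====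
theorem fences_to_sides_spec : Claim_equal_fences_to_sides := by
  intro fences _ hpre
  obtain ⟨hlen, h2ne, h3ne, h2rect, h3rect⟩ := hpre
  rcases fences with _ | ⟨g0, _ | ⟨g1, _ | ⟨g2, _ | ⟨g3, rest⟩⟩⟩⟩ <;>
    simp only [List.length] at hlen <;> try omega
  simp only [List.getD_cons_zero, List.getD_cons_succ] at h2rect h3rect
  unfold Spec_fences_to_sides fences_to_sides fences_to_sides_alt colGridScore
  simp only [List.getD_cons_zero, List.getD_cons_succ, rows_sum, cols_sum]
  rw [col_grid_eq g2 _ h2rect, col_grid_eq g3 _ h3rect]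
  have hrow : ∀ g : List (List Bool),
      (List.map (fun row => countRunsL false row) g).sum = (g.map rowScore).sum := by
    intro g
    exact congrArg List.sum (List.map_congr_left (fun r _ => by rw [runs_false]; rfl))
  rw [hrow g0, hrow g1]
  ring
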